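-- pv_equiv track=rewrite | github.com/mahidhar93988/python-basics-nd-self | Number_occurring_maximum_times.py | solve
-- ===== SOURCE A (Python) =====
-- def solve(arr, n):
--
--     count = 1
--
--     for i in range(1, n):
--         if arr[i] == arr[i-1]:
--             count += 1
--
--         else:
--             if count == 4:
--                 return arr[i-1]
--             count = 1
--
--     if count == 4:
--         return arr[n-1]
--
--     return -1
-- ===== SOURCE B (Python) =====
-- def solve(arr, n):
--     vals = arr[:max(n, 0)]
--     runs = []  # run-length encoding of vals: [value, length] per maximal run
--     for x in vals:
--         if runs and runs[-1][0] == x: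
--             runs[-1][1] += 1
--         else:
--             runs.append([x, 1])
--     for val, length in runs:
--         if length == 4:
--             return val
--     return -1
-- ===== Notes on version B (the rewrite author's own statement) =====
-- stated objective: alternative
-- what changed: A fuses run counting and the length-4 test in one index loop with early returns; B first builds the run-length encoding of the first-n prefix and then scans the runs for one of length exactly 4.
-- crash fix: When n > 1 and n exceeds len(arr), A raises IndexError while B answers over the available prefix arr[:n] (returns the first value with a consecutive run of exactly 4 there, else -1). — e.g. on solve([5, 5, 5, 5], 6): A raises IndexError, B returns 5
import Mathlib
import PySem

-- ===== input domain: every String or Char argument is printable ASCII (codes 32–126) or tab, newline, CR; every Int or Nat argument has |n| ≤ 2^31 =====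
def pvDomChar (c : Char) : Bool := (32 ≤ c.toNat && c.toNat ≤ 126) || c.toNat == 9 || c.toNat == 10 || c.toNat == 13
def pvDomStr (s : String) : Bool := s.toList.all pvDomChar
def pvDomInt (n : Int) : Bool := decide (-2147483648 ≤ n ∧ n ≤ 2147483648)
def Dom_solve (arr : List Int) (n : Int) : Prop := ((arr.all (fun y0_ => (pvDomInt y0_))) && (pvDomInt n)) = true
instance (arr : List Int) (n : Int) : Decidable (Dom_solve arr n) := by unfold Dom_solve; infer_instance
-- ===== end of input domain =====

-- B replaces A's fused running counter by run-length-encode-then-scan (alternative decomposition, same cost).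
-- ===== PORT A =====
-- the for-loop over range(1, n) with its early returns; arr[i] ported as pyGetD (in range under Pre_solve)
def solveGo (arr : List Int) (n : Int) : List Int → Int → Int
  | [], count =>
      if count = 4 then PySem.List.pyGetD arr (n - 1) 0 else -1
  | i :: rest, count =>
      if PySem.List.pyGetD arr i 0 = PySem.List.pyGetD arr (i - 1) 0 then
        solveGo arr n rest (count + 1)
      else
        if count = 4 then PySem.List.pyGetD arr (i - 1) 0
        else solveGo arr n rest 1

def solve (arr : List Int) (n : Int) : Int :=
  solveGo arr n (PySem.List.pyRange 1 n 1) 1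

-- ===== PORT B =====
-- one step of B's first loop: bump the length of the last run, or start a new run
def runsStep (runs : List (Int × Int)) (x : Int) : List (Int × Int) :=
  match runs.getLast? with
  | some (y, k) => if y = x then runs.dropLast ++ [(y, k + 1)] else runs ++ [(x, 1)]
  | none => runs ++ [(x, 1)]

-- B's second loop: first run of length exactly 4, else -1
def findRun4 : List (Int × Int) → Int
  | [] => -1
  | (v, l) :: t => if l = 4 then v else findRun4 t

def solve_alt (arr : List Int) (n : Int) : Int :=
  findRun4 (List.foldl runsStep [] (PySem.List.slice arr none (some (max n 0))))

-- ===== PRECONDITION & SPEC =====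
-- A raises IndexError iff 1 < n and n > len(arr); exactly those inputs are excluded.
def Pre_solve (arr : List Int) (n : Int) : Prop := 1 < n → n ≤ (arr.length : Int)
instance (arr : List Int) (n : Int) : Decidable (Pre_solve arr n) := by unfold Pre_solve; infer_instance
def pvWitness_solve : List Int × Int := ([1, 1, 1, 1, 2], 5)

-- When n > 1 and n exceeds len(arr), A raises IndexError while B answers over the available prefix arr[:n].
def Raises_solve (arr : List Int) (n : Int) : Prop := 1 < n ∧ (arr.length : Int) < n
instance (arr : List Int) (n : Int) : Decidable (Raises_solve arr n) := by unfold Raises_solve; infer_instance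
def pvRaiseWitness_solve : List Int × Int := ([5, 5, 5, 5], 6)
def pvRaiseWitnessOut_solve : Int := 5

def Spec_solve (arr : List Int) (n : Int) (out : Int) : Prop := out = solve_alt arr n
instance (arr : List Int) (n : Int) (out : Int) : Decidable (Spec_solve arr n out) := by unfold Spec_solve; infer_instance

-- ===== CLAIM (what is proved, stated in full; the proofs are below) =====
def Claim_equal_solve : Prop := ∀ (arr : List Int) (n : Int), Dom_solve arr n → Pre_solve arr n → Spec_solve arr n (solve arr n)
def Claim_raises_solve : Prop := (∀ (arr : List Int) (n : Int), Dom_solve arr n → Raises_solve arr n → ¬ Pre_solve arr n) ∧ (Dom_solve (pvRaiseWitness_solve.1) (pvRaiseWitness_solve.2) ∧ Raises_solve (pvRaiseWitness_solve.1) (pvRaiseWitness_solve.2) ∧ solve_alt (pvRaiseWitness_solve.1) (pvRaiseWitness_solve.2) = pvRaiseWitnessOut_solve)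

-- ===== LEMMAS AND PROOFS =====

-- the run-length encoding of xs continued from an open run (prev, count)
def rleCont (prev count : Int) : List Int → List (Int × Int)
  | [] => [(prev, count)]
  | x :: xs => if x = prev then rleCont prev (count + 1) xs else (prev, count) :: rleCont x 1 xs

theorem foldl_runsStep (xs : List Int) : ∀ (acc : List (Int × Int)) (p c : Int),
    List.foldl runsStep (acc ++ [(p, c)]) xs = acc ++ rleCont p c xs := by
  induction xs with
  | nil => intro acc p c; simp [rleCont]
  | cons x xs ih =>
      intro acc p c
      have hstep : runsStep (acc ++ [(p, c)]) x =
          if p = x then acc ++ [(p, c + 1)] else (acc ++ [(p, c)]) ++ [(x, 1)] := by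
        simp [runsStep]
      by_cases h : p = x
      · subst h
        rw [List.foldl_cons, hstep, if_pos rfl, ih]
        simp [rleCont]
      · rw [List.foldl_cons, hstep, if_neg h, ih]
        simp [rleCont, Ne.symm h]

theorem solveGo_eq_rleCont (arr : List Int) (n : Int) (hn : n ≤ (arr.length : Int)) :
    ∀ (k : Nat) (i count : Int), 1 ≤ i → i + (k : Int) = n →
    solveGo arr n (PySem.List.pyRange i n 1) count =
      findRun4 (rleCont (arr.getD (i - 1).toNat 0) count
        (List.drop i.toNat (List.take n.toNat arr))) := by
  intro k
  induction k with
  | zero =>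
      intro i count h1 hk
      have hin : i = n := by omega
      subst hin
      rw [PySem.List.pyRange_one_eq_nil le_rfl]
      have hdrop : List.drop i.toNat (List.take i.toNat arr) = [] := by
        apply List.drop_eq_nil_of_le; simp
      rw [hdrop]
      simp only [solveGo, rleCont, findRun4]
      have hget : PySem.List.pyGetD arr (i - 1) 0 = arr.getD (i - 1).toNat 0 := by
        rw [PySem.List.pyGetD_eq_getElem arr 0 (by omega) (by omega)]
        rw [List.getD_eq_getElem _ _ (by omega)]
      rw [hget]
  | succ k ih =>
      intro i count h1 hk
      have hlt : i < n := by omega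
      rw [PySem.List.pyRange_one_cons hlt]
      have hitlt : i.toNat < (List.take n.toNat arr).length := by
        simp [List.length_take]; omega
      have hdrop : List.drop i.toNat (List.take n.toNat arr) =
          (List.take n.toNat arr)[i.toNat] :: List.drop (i.toNat + 1) (List.take n.toNat arr) :=
        List.drop_eq_getElem_cons hitlt
      have hgi : (List.take n.toNat arr)[i.toNat] = arr[i.toNat]'(by omega) := by
        simp [List.getElem_take]
      have hcur : PySem.List.pyGetD arr i 0 = arr[i.toNat]'(by omega) := by
        rw [PySem.List.pyGetD_eq_getElem arr 0 (by omega) (by omega)]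
      have hprev : PySem.List.pyGetD arr (i - 1) 0 = arr.getD (i - 1).toNat 0 := by
        rw [PySem.List.pyGetD_eq_getElem arr 0 (by omega) (by omega)]
        rw [List.getD_eq_getElem _ _ (by omega)]
      have hsucc2 : (i + 1).toNat = i.toNat + 1 := by omega
      have hnext : arr.getD (i + 1 - 1).toNat 0 = arr[i.toNat]'(by omega) := by
        rw [show (i + 1 - 1).toNat = i.toNat by omega, List.getD_eq_getElem _ _ (by omega)]
      rw [hdrop, hgi]
      simp only [solveGo, rleCont, hcur, hprev]
      by_cases hb : arr[i.toNat]'(by omega) = arr.getD (i - 1).toNat 0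
      · rw [if_pos hb, if_pos hb, ih (i + 1) (count + 1) (by omega) (by omega), hnext, hsucc2, hb]
      · rw [if_neg hb, if_neg hb]
        simp only [findRun4]
        by_cases hc : count = 4
        · rw [if_pos hc, if_pos hc]
        · rw [if_neg hc, if_neg hc, ih (i + 1) 1 (by omega) (by omega), hnext, hsucc2]

theorem solve_spec : Claim_equal_solve := by
  intro arr n _ hpre
  unfold Spec_solve solve solve_alt
  rw [PySem.List.slice_to arr (by omega : (0 : Int) ≤ max n 0)]
  by_cases hn : n ≤ 0
  · have h0 : (max n 0).toNat = 0 := by omega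
    rw [PySem.List.pyRange_one_eq_nil (by omega), h0]
    simp [solveGo, findRun4]
  · have h1n : 1 ≤ n := by omega
    have hmax : (max n 0).toNat = n.toNat := by omega
    rw [hmax]
    by_cases hlen : n ≤ (arr.length : Int)
    · -- vals = take n arr is nonempty
      have hl0 : 0 < (List.take n.toNat arr).length := by
        simp [List.length_take]; omega
      have hvals : List.take n.toNat arr =
          (List.take n.toNat arr)[0] :: List.drop 1 (List.take n.toNat arr) := by
        simpa using List.drop_eq_getElem_cons hl0
      have hv0 : (List.take n.toNat arr)[0]'hl0 = arr.getD 0 0 := by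
        rw [List.getElem_take, List.getD_eq_getElem _ _ (by omega)]
      have hfirst : runsStep [] ((List.take n.toNat arr)[0]'hl0) =
          [] ++ [((List.take n.toNat arr)[0]'hl0, 1)] := by
        simp [runsStep]
      rw [hvals, List.foldl_cons, hfirst, foldl_runsStep, List.nil_append, hv0]
      have hmain := solveGo_eq_rleCont arr n hlen (n - 1).toNat 1 1 (by omega) (by omega)
      rw [hmain]
      norm_num
    · -- Pre forces n = 1 here, and arr must be empty
      have hn1 : n = 1 := by
        rcases lt_or_ge 1 n with h | h
        · exact absurd (hpre h) hlen
        · omega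
      subst hn1
      have harr : arr = [] := by
        cases arr with
        | nil => rfl
        | cons a t =>
            exfalso
            apply hlen
            have h' : ((a :: t).length : Int) = (t.length : Int) + 1 := by simp
            omega
      subst harr
      rw [PySem.List.pyRange_one_eq_nil (by omega : (1:Int) ≤ 1)]
      simp [solveGo, findRun4]

def solve_raises : Claim_raises_solve := by
  unfold Claim_raises_solve
  constructor
  · intro arr n _ hr hpre
    obtain ⟨h1, h2⟩ := hr
    have := hpre h1
    omega
  · exact ⟨by decide, by decide, by decide⟩
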